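-- pv_equiv track=rewrite | github.com/Vlad-Harutyunyan/Python450-advance | week2/Nairi/homework2.py | all_sums
-- ===== SOURCE A (Python) =====
-- def all_sums(numm:int) -> list :
--     cnt = numm//2
--     left = list(range(1,cnt+1))
--     right = list(range(cnt,numm))
--     r = []
--
--     for x in left :
--         for y in right :
--             if x + y == numm :
--                 r.append((x,y))
--     return r
-- ===== SOURCE B (Python) =====
-- def all_sums(numm: int) -> list:
--     # Closed form: each x in the left range pairs with the unique partner numm - x.
--     return [(x, numm - x) for x in range(1, numm // 2 + 1)]
-- ===== Notes on version B (the rewrite author's own statement) =====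
-- stated objective: faster
-- what changed: Replaced the nested scan of the two ranges by a closed form that pairs each element of the left range directly with its unique partner, so the inner loop disappears.
import Mathlib
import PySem

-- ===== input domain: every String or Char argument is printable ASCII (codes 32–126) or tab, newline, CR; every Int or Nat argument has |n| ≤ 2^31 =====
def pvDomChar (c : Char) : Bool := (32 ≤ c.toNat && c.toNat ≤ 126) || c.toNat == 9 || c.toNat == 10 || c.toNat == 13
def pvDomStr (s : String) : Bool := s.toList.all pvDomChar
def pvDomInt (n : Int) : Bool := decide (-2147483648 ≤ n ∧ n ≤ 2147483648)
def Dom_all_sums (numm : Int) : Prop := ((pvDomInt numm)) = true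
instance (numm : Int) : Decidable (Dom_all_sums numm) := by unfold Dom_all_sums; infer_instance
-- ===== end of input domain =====

-- B replaces A's nested O(n^2) scan by the closed form (x, numm-x) for x in 1..numm//2 (faster, asymptotic).

-- ===== PORT A =====
def all_sums (numm : Int) : List (Int × Int) :=
  let cnt := PySem.Int.floordiv numm 2
  let left := PySem.List.pyRange 1 (cnt + 1) 1
  let right := PySem.List.pyRange cnt numm 1
  left.foldl (fun r x =>
    right.foldl (fun r y => if x + y = numm then r ++ [(x, y)] else r) r) []

-- ===== PORT B =====
def all_sums_alt (numm : Int) : List (Int × Int) :=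
  (PySem.List.pyRange 1 (PySem.Int.floordiv numm 2 + 1) 1).map (fun x => (x, numm - x))

-- ===== PRECONDITION & SPEC =====
def Spec_all_sums (numm : Int) (out : List (Int × Int)) : Prop := out = all_sums_alt numm
instance (numm : Int) (out : List (Int × Int)) : Decidable (Spec_all_sums numm out) := by unfold Spec_all_sums; infer_instance

-- ===== CLAIM (what is proved, stated in full; the proofs are below) =====
def Claim_equal_all_sums : Prop := ∀ (numm : Int), Dom_all_sums numm → Spec_all_sums numm (all_sums numm)

-- ===== LEMMAS AND PROOFS =====

-- In a strictly sorted (hence nodup) integer range, filtering for the value v keeps exactly [v] when v is in range.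
lemma filter_pyRange_eq_singleton (a b v : Int) (h1 : a ≤ v) (h2 : v < b) :
    (PySem.List.pyRange a b 1).filter (fun y => decide (y = v)) = [v] := by
  have hv : v ∈ PySem.List.pyRange a b 1 := by
    rw [PySem.List.mem_pyRange_one]; exact ⟨h1, h2⟩
  have hnd := PySem.List.nodup_pyRange_one (a := a) (b := b)
  have hcnt : (PySem.List.pyRange a b 1).count v = 1 :=
    List.count_eq_one_of_mem hnd hv
  calc (PySem.List.pyRange a b 1).filter (fun y => decide (y = v))
      = (PySem.List.pyRange a b 1).filter (fun y => y == v) := by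
        apply List.filter_congr; intro y _; by_cases h : y = v <;> simp [h]
    _ = List.replicate ((PySem.List.pyRange a b 1).count v) v := List.filter_beq v
    _ = [v] := by rw [hcnt]; rfl

lemma flatMap_eq_map_of_singleton {α β : Type} (l : List α) (g : α → List β) (f : α → β)
    (h : ∀ x ∈ l, g x = [f x]) : l.flatMap g = l.map f := by
  induction l with
  | nil => rfl
  | cons x xs ih =>
    simp only [List.flatMap_cons, List.map_cons]
    rw [h x (by simp), ih (fun y hy => h y (by simp [hy]))]
    rfl

theorem all_sums_eq_alt (numm : Int) : all_sums numm = all_sums_alt numm := by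
  unfold all_sums all_sums_alt
  simp only []
  set cnt := PySem.Int.floordiv numm 2 with hcnt
  have hfd : cnt = Int.fdiv numm 2 := rfl
  have hcb : 2 * cnt ≤ numm ∧ numm ≤ 2 * cnt + 1 := by
    rw [hfd, Int.fdiv_eq_ediv]
    simp only [show ((0:Int) ≤ 2 ∨ (2:Int) ∣ numm) from Or.inl (by norm_num), if_pos]
    omega
  -- inner loop: append exactly the matching y's
  have hinner : ∀ (r : List (Int × Int)) (x : Int),
      (PySem.List.pyRange cnt numm 1).foldl
        (fun r y => if x + y = numm then r ++ [(x, y)] else r) r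
      = r ++ ((PySem.List.pyRange cnt numm 1).filter
                (fun y => decide (x + y = numm))).map (fun y => (x, y)) := by
    intro r x
    exact PySem.List.foldl_append_ite (p := fun y => x + y = numm) (f := fun y => (x, y)) _ _
  have houter :
      (PySem.List.pyRange 1 (cnt + 1) 1).foldl (fun r x =>
        (PySem.List.pyRange cnt numm 1).foldl
          (fun r y => if x + y = numm then r ++ [(x, y)] else r) r) []
      = (PySem.List.pyRange 1 (cnt + 1) 1).foldl (fun r x =>
          r ++ ((PySem.List.pyRange cnt numm 1).filter
                  (fun y => decide (x + y = numm))).map (fun y => (x, y))) [] :=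
    PySem.List.foldl_congr_mem _ _ _ _ (fun acc x hx => hinner acc x)
  rw [houter, PySem.List.foldl_append_eq_flatMap, List.nil_append]
  apply flatMap_eq_map_of_singleton
  intro x hx
  rw [PySem.List.mem_pyRange_one] at hx
  have hfil : (PySem.List.pyRange cnt numm 1).filter (fun y => decide (x + y = numm))
      = [numm - x] := by
    have : (PySem.List.pyRange cnt numm 1).filter (fun y => decide (x + y = numm))
        = (PySem.List.pyRange cnt numm 1).filter (fun y => decide (y = numm - x)) := by
      apply List.filter_congr; intro y _
      simp only [decide_eq_decide]; omega
    rw [this]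
    exact filter_pyRange_eq_singleton cnt numm (numm - x) (by omega) (by omega)
  rw [hfil]; rfl

-- ===== VERDICT (by name: the statement is the Claim_ definition above) =====
theorem all_sums_spec : Claim_equal_all_sums := by
  intro numm _
  unfold Spec_all_sums
  exact all_sums_eq_alt numm
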